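-- pv_equiv track=rewrite | github.com/ankitsainidev/maruti | maruti/vision/video.py | expand_detection
-- ===== SOURCE A (Python) =====
-- def expand_detection(detections, idx, length):
--     assert (len(detections) == len(
--         idx)), f'length of detection ({len(detections)}) and indices ({len(idx)}) must be same'
--
--     j = 0
--     last = detections[j] if detections[j] is not None else []
--     final_detections = []
--
--     for i in range(length):
--         if i in idx:
--             last = detections[idx.index(i)]
--             if last is None:
--                 last = []
--         final_detections.append(last)
--     return final_detections
-- ===== SOURCE B (Python) =====
-- def expand_detection(detections, idx, length):
--     assert (len(detections) == len(
--         idx)), f'length of detection ({len(detections)}) and indices ({len(idx)}) must be same'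
--     last = detections[0] if detections[0] is not None else []
--     anchors = {}
--     for v, det in zip(idx, detections):
--         if 0 <= v < length and v not in anchors:
--             anchors[v] = det if det is not None else []
--     result = []
--     prev = 0
--     for v in sorted(anchors):
--         result.extend([last] * (v - prev))
--         last = anchors[v]
--         result.append(last)
--         prev = v + 1
--     result.extend([last] * (length - prev))
--     return result
-- ===== Notes on version B (the rewrite author's own statement) =====
-- stated objective: faster
-- what changed: Replaces the per-position 'i in idx' membership scan and repeated idx.index(i) scan (O(length*len(idx))) with a first-occurrence anchor dictionary built once, then one pass over the sorted anchors that fills each gap with a replicated segment.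
import Mathlib
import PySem

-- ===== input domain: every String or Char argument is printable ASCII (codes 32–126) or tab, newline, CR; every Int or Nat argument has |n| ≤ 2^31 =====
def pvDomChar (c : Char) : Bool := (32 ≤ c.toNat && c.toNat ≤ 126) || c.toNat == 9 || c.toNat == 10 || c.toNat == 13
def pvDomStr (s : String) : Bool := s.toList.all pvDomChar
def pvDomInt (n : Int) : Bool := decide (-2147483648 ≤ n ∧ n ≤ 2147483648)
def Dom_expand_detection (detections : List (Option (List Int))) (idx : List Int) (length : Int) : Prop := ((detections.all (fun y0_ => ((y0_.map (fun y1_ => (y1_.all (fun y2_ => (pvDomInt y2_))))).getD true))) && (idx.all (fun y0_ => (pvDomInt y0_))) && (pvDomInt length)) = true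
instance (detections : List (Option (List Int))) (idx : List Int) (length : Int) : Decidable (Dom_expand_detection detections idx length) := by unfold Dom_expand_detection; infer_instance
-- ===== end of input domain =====

-- B replaces A's per-position membership/index scans with a first-occurrence anchor
-- dictionary and one sorted segment-filling pass (objective: faster).

-- ===== PORT A =====
def expand_detection (detections : List (Option (List Int))) (idx : List Int) (length : Int) : List (List Int) :=
  -- assert len(detections) == len(idx): AssertionError excluded by Pre_
  -- detections[0]: IndexError on empty detections excluded by Pre_
  let last0 : List Int :=
    match PySem.List.pyGet? detections 0 with
    | some (some d) => d
    | _ => []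
  ((PySem.List.pyRange 0 length 1).foldl
    (fun (st : List Int × List (List Int)) i =>
      let last :=
        if idx.contains i then
          match PySem.List.index? idx i with
          | some j =>
            match PySem.List.pyGet? detections (j : Int) with
            | some (some d) => d        -- last = detections[idx.index(i)]
            | _ => []                   -- `if last is None: last = []`; IndexError unreachable under Pre_
          | none => st.1                -- unreachable: contains succeeded
        else st.1
      (last, st.2 ++ [last]))
    (last0, [])).2

-- ===== PORT B =====
def expand_detection_alt (detections : List (Option (List Int))) (idx : List Int) (length : Int) : List (List Int) :=
  -- same assert and detections[0] access as in Source B; Pre_ excludes the raising inputs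
  -- last0 = detections[0] if not None else []; the outer getD none is the IndexError case, excluded by Pre_
  let last0 : List Int := ((PySem.List.pyGet? detections 0).getD none).getD []
  let anchors : PySem.Dict Int (List Int) :=
    (idx.zip detections).foldl
      (fun d p =>
        if 0 ≤ p.1 ∧ p.1 < length ∧ d.contains p.1 = false then
          d.insert p.1 (p.2.getD [])
        else d)
      PySem.Dict.empty
  let fin := (PySem.List.sorted anchors.keys (fun x => x) false).foldl
    (fun (st : List (List Int) × List Int × Int) v =>
      let last := anchors.getD v []
      (st.1 ++ List.replicate (v - st.2.2).toNat st.2.1 ++ [last], last, v + 1))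
    ([], last0, 0)
  fin.1 ++ List.replicate (length - fin.2.2).toNat fin.2.1

-- ===== PRECONDITION & SPEC =====
-- Pre_ excludes exactly the inputs on which A raises: a length mismatch (AssertionError)
-- and empty detections (IndexError from detections[0]).
def Pre_expand_detection (detections : List (Option (List Int))) (idx : List Int) (length : Int) : Prop :=
  detections ≠ [] ∧ detections.length = idx.length
instance (detections : List (Option (List Int))) (idx : List Int) (length : Int) : Decidable (Pre_expand_detection detections idx length) := by unfold Pre_expand_detection; infer_instance
def pvWitness_expand_detection : List (Option (List Int)) × List Int × Int := ([some [1], none], [0, 2], 4)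
def Spec_expand_detection (detections : List (Option (List Int))) (idx : List Int) (length : Int) (out : List (List Int)) : Prop := out = expand_detection_alt detections idx length
instance (detections : List (Option (List Int))) (idx : List Int) (length : Int) (out : List (List Int)) : Decidable (Spec_expand_detection detections idx length out) := by unfold Spec_expand_detection; infer_instance

-- ===== CLAIM (what is proved, stated in full; the proofs are below) =====
def Claim_equal_expand_detection : Prop := ∀ (detections : List (Option (List Int))) (idx : List Int) (length : Int), Dom_expand_detection detections idx length → Pre_expand_detection detections idx length → Spec_expand_detection detections idx length (expand_detection detections idx length)

-- ===== LEMMAS AND PROOFS =====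

-- first-match lookup over the (idx value, detection) pairs, None normalised to []
def pvL (ps : List (Int × Option (List Int))) (v : Int) : Option (List Int) :=
  (ps.find? (fun p => p.1 == v)).map (fun p => p.2.getD [])

-- abstract form of A's loop: outputs and final carry
def pvAOut (L : Int → Option (List Int)) : List Int → List Int → List (List Int)
  | [], _ => []
  | i :: r, last => (L i).getD last :: pvAOut L r ((L i).getD last)
def pvALast (L : Int → Option (List Int)) : List Int → List Int → List Int
  | [], last => last
  | i :: r, last => pvALast L r ((L i).getD last)

-- abstract form of B's segment filling over the sorted anchors
def pvBOut (g : Int → List Int) (n : Int) : List Int → Int → List Int → List (List Int)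
  | [], p, last => List.replicate (n - p).toNat last
  | v :: vs, p, last => List.replicate (v - p).toNat last ++ g v :: pvBOut g n vs (v + 1) (g v)

theorem pvAOut_foldl (L : Int → Option (List Int)) (r : List Int) :
    ∀ (last : List Int) (acc : List (List Int)),
    r.foldl (fun (st : List Int × List (List Int)) i =>
        ((L i).getD st.1, st.2 ++ [(L i).getD st.1])) (last, acc)
      = (pvALast L r last, acc ++ pvAOut L r last) := by
  induction r with
  | nil => intro last acc; simp [pvALast, pvAOut]
  | cons i r ih => intro last acc; simp [List.foldl_cons, pvALast, pvAOut, ih]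

theorem pvAOut_append (L : Int → Option (List Int)) (r1 r2 : List Int) :
    ∀ last, pvAOut L (r1 ++ r2) last = pvAOut L r1 last ++ pvAOut L r2 (pvALast L r1 last) := by
  induction r1 with
  | nil => intro last; simp [pvAOut, pvALast]
  | cons i r ih => intro last; simp [pvAOut, pvALast, ih]

theorem pvAOut_none (L : Int → Option (List Int)) (n : Int) :
    ∀ (k : Nat) (p : Int) (last : List Int), (n - p).toNat = k →
    (∀ i, p ≤ i → i < n → L i = none) →
    pvAOut L (PySem.List.pyRange p n 1) last = List.replicate (n - p).toNat last ∧
    pvALast L (PySem.List.pyRange p n 1) last = last := by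
  intro k
  induction k with
  | zero =>
    intro p last hk _
    rw [PySem.List.pyRange_one_eq_nil (by omega)]
    simp [pvAOut, pvALast, hk]
  | succ k ih =>
    intro p last hk hnone
    have hpn : p < n := by omega
    rw [PySem.List.pyRange_one_cons hpn]
    have hLp : L p = none := hnone p le_rfl hpn
    have ih' := ih (p + 1) last (by omega) (fun i h1 h2 => hnone i (by omega) h2)
    simp only [pvAOut, pvALast, hLp, Option.getD_none]
    refine ⟨?_, ih'.2⟩
    rw [ih'.1]
    have : (n - p).toNat = (n - (p + 1)).toNat + 1 := by omega
    rw [this, List.replicate_succ]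

theorem pvMain (L : Int → Option (List Int)) (n : Int) :
    ∀ (vs : List Int) (p : Int) (last : List Int),
    (∀ v ∈ vs, p ≤ v ∧ v < n) →
    vs.Pairwise (· < ·) →
    (∀ i, p ≤ i → i < n → ((L i).isSome ↔ i ∈ vs)) →
    pvBOut (fun v => (L v).getD []) n vs p last = pvAOut L (PySem.List.pyRange p n 1) last := by
  intro vs
  induction vs with
  | nil =>
    intro p last _ _ hmem
    have hnone : ∀ i, p ≤ i → i < n → L i = none := by
      intro i h1 h2
      have h := hmem i h1 h2
      simp only [List.not_mem_nil, iff_false] at h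
      exact Option.not_isSome_iff_eq_none.mp h
    exact ((pvAOut_none L n (n - p).toNat p last rfl hnone).1).symm
  | cons v vs ih =>
    intro p last hbnd hpw hmem
    have hpv : p ≤ v := (hbnd v (by simp)).1
    have hvn : v < n := (hbnd v (by simp)).2
    have hvs_gt : ∀ w ∈ vs, v < w := (List.pairwise_cons.mp hpw).1
    -- L is none on [p, v)
    have hnone : ∀ i, p ≤ i → i < v → L i = none := by
      intro i h1 h2
      have hi : ¬ (L i).isSome := by
        rw [hmem i h1 (by omega)]
        simp only [List.mem_cons]
        rintro (rfl | hin)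
        · omega
        · exact absurd (hvs_gt i hin) (by omega)
      simpa [Option.not_isSome_iff_eq_none] using hi
    have hsplit : PySem.List.pyRange p n 1
        = PySem.List.pyRange p v 1 ++ (v :: PySem.List.pyRange (v + 1) n 1) := by
      rw [PySem.List.pyRange_one_append p v n hpv (by omega), PySem.List.pyRange_one_cons hvn]
    obtain ⟨d, hd⟩ : ∃ d, L v = some d := by
      have : (L v).isSome := (hmem v hpv hvn).mpr (by simp)
      exact Option.isSome_iff_exists.mp this
    have hseg := pvAOut_none L v (v - p).toNat p last rfl hnone
    rw [hsplit, pvAOut_append, hseg.1, hseg.2]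
    have hih : pvBOut (fun v => (L v).getD []) n vs (v + 1) d = pvAOut L (PySem.List.pyRange (v + 1) n 1) d :=
      ih (v + 1) d
        (fun w hw => ⟨by have := hvs_gt w hw; omega, (hbnd w (by simp [hw])).2⟩)
        (List.pairwise_cons.mp hpw).2
        (fun i h1 h2 => by
          rw [hmem i (by omega) h2]
          simp only [List.mem_cons]
          constructor
          · rintro (rfl | h)
            · omega
            · exact h
          · exact fun h => Or.inr h)
    simp only [pvAOut, hd, Option.getD_some]
    rw [pvBOut]
    simp only [hd, Option.getD_some, hih]

-- pvL over a zip, in terms of index?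
theorem pvL_zip (xs : List Int) :
    ∀ (ys : List (Option (List Int))), xs.length = ys.length → ∀ (i : Int),
    pvL (xs.zip ys) i = (PySem.List.index? xs i).bind (fun j => ys[j]?.map (fun d => d.getD [])) := by
  induction xs with
  | nil => intro ys _ i; simp [pvL, PySem.List.index?]
  | cons x xs ih =>
    intro ys hlen i
    cases ys with
    | nil => simp at hlen
    | cons y ys =>
      by_cases hx : x = i
      · subst hx
        rw [PySem.List.index?_cons_self]
        simp [pvL, List.zip]
      · rw [PySem.List.index?_cons_of_ne xs hx]
        have := ih ys (by simpa using hlen) i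
        simp only [pvL, List.zip] at this ⊢
        simp only [List.zipWith_cons_cons, List.find?_cons]
        have hbeq : (x == i) = false := by simp [hx]
        simp only [hbeq, this]
        cases PySem.List.index? xs i with
        | none => simp
        | some j => simp

-- A's per-step value equals the getD of pvL over the zip (needs equal lengths)
theorem pvStep_eq (detections : List (Option (List Int))) (idx : List Int)
    (hlen : detections.length = idx.length) (i : Int) (last : List Int) :
    (if idx.contains i then
        match PySem.List.index? idx i with
        | some j =>
          match PySem.List.pyGet? detections (j : Int) with
          | some (some d) => d
          | _ => []
        | none => last
      else last)
    = (pvL (idx.zip detections) i).getD last := by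
  rw [pvL_zip idx detections (by omega) i]
  by_cases hmem : i ∈ idx
  · have hcont : idx.contains i = true := by simpa using hmem
    obtain ⟨j, hj⟩ : ∃ j, PySem.List.index? idx i = some j :=
      Option.isSome_iff_exists.mp (by rw [PySem.List.index?_isSome_iff]; exact hmem)
    have hjlt : j < idx.length := by
      rw [PySem.List.index?_eq_some_iff] at hj
      obtain ⟨pre, suf, heq, rfl, -⟩ := hj
      simp [heq]
    have hj' : PySem.List.index? idx i = some j := by
      rw [PySem.List.index?_eq_some_iff] at hj ⊢; exact hj
    have hjd : j < detections.length := by omega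
    have hget : detections[j]? = some detections[j] := List.getElem?_eq_getElem hjd
    simp only [hcont, if_true, hj', PySem.List.pyGet?_natCast, hget, Option.bind_some,
      Option.map_some, Option.getD_some]
    cases detections[j] with
    | none => rfl
    | some d => rfl
  · have hcont : idx.contains i = false := by simpa using hmem
    have hidx : PySem.List.index? idx i = none := (PySem.List.index?_eq_none_iff idx i).mpr hmem
    rw [hcont, hidx]
    simp

-- the anchor-dictionary build used by B
def pvBuild (n : Int) (d : PySem.Dict Int (List Int)) (ps : List (Int × Option (List Int))) :
    PySem.Dict Int (List Int) :=
  ps.foldl (fun d p =>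
    if 0 ≤ p.1 ∧ p.1 < n ∧ d.contains p.1 = false then d.insert p.1 (p.2.getD []) else d) d

theorem pvBuild_get? (n : Int) (ps : List (Int × Option (List Int))) :
    ∀ (d : PySem.Dict Int (List Int)) (v : Int), 0 ≤ v → v < n →
    (pvBuild n d ps).get? v = ((d.get? v).or (pvL ps v)) := by
  induction ps with
  | nil =>
    intro d v _ _
    simp [pvBuild, pvL]
  | cons p ps ih =>
    intro d v h0 hn
    rw [pvBuild, List.foldl_cons]
    have step : (ps.foldl (fun d p =>
        if 0 ≤ p.1 ∧ p.1 < n ∧ d.contains p.1 = false then d.insert p.1 (p.2.getD []) else d)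
          (if 0 ≤ p.1 ∧ p.1 < n ∧ d.contains p.1 = false then d.insert p.1 (p.2.getD []) else d))
        = pvBuild n (if 0 ≤ p.1 ∧ p.1 < n ∧ d.contains p.1 = false then d.insert p.1 (p.2.getD []) else d) ps := rfl
    rw [step, ih _ v h0 hn]
    by_cases hpv : p.1 = v
    · have hLcons : pvL (p :: ps) v = some (p.2.getD []) := by
        simp [pvL, hpv]
      rw [hLcons]
      by_cases hc : d.contains v = false
      · have hgetnone : d.get? v = none := by
          rcases h : d.get? v with _ | x
          · rfl
          · exfalso
            have : d.contains v = (d.get? v).isSome := PySem.Dict.contains_eq_isSome_get? d v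
            rw [h] at this; simp [this] at hc
        rw [if_pos ⟨by omega, by omega, by rw [hpv]; exact hc⟩]
        rw [hpv, PySem.Dict.get?_insert_self, hgetnone]
        simp
      · have hc' : d.contains v = true := by simpa using hc
        obtain ⟨x, hx⟩ : ∃ x, d.get? v = some x := by
          have : d.contains v = (d.get? v).isSome := PySem.Dict.contains_eq_isSome_get? d v
          rw [hc'] at this
          exact Option.isSome_iff_exists.mp this.symm
        rw [if_neg (by rw [hpv]; simp [hc'])]
        rw [hx]; simp
    · have hLcons : pvL (p :: ps) v = pvL ps v := by
        simp [pvL, hpv]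
      rw [hLcons]
      by_cases hcnd : 0 ≤ p.1 ∧ p.1 < n ∧ d.contains p.1 = false
      · rw [if_pos hcnd, PySem.Dict.get?_insert_of_ne _ _ (fun h => hpv h.symm)]
      · rw [if_neg hcnd]

theorem pvBuild_keys_range (n : Int) (ps : List (Int × Option (List Int))) :
    ∀ (d : PySem.Dict Int (List Int)) (v : Int),
    v ∈ (pvBuild n d ps).keys → v ∈ d.keys ∨ (0 ≤ v ∧ v < n) := by
  induction ps with
  | nil => intro d v h; exact Or.inl h
  | cons p ps ih =>
    intro d v h
    rw [pvBuild, List.foldl_cons] at h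
    rcases ih _ v h with hmem | hr
    · by_cases hcnd : 0 ≤ p.1 ∧ p.1 < n ∧ d.contains p.1 = false
      · rw [if_pos hcnd] at hmem
        rcases (PySem.Dict.mem_keys_insert _ _ _ _).mp hmem with rfl | hmem'
        · exact Or.inr ⟨hcnd.1, hcnd.2.1⟩
        · exact Or.inl hmem'
      · rw [if_neg hcnd] at hmem; exact Or.inl hmem
    · exact Or.inr hr

theorem pvBuild_keys_nodup (n : Int) (ps : List (Int × Option (List Int))) :
    ∀ (d : PySem.Dict Int (List Int)), d.keys.Nodup → (pvBuild n d ps).keys.Nodup := by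
  induction ps with
  | nil => intro d h; exact h
  | cons p ps ih =>
    intro d h
    rw [pvBuild, List.foldl_cons]
    by_cases hcnd : 0 ≤ p.1 ∧ p.1 < n ∧ d.contains p.1 = false
    · rw [if_pos hcnd]
      exact ih _ (PySem.Dict.nodup_keys_insert _ _ _ h)
    · rw [if_neg hcnd]; exact ih _ h

theorem pvBOut_foldl (g : Int → List Int) (n : Int) (vs : List Int) :
    ∀ (acc : List (List Int)) (last : List Int) (p : Int),
    (let fin := vs.foldl (fun (st : List (List Int) × List Int × Int) v =>
        (st.1 ++ List.replicate (v - st.2.2).toNat st.2.1 ++ [g v], g v, v + 1)) (acc, last, p)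
     fin.1 ++ List.replicate (n - fin.2.2).toNat fin.2.1)
      = acc ++ pvBOut g n vs p last := by
  induction vs with
  | nil => intro acc last p; simp [pvBOut]
  | cons v vs ih =>
    intro acc last p
    simp only [List.foldl_cons]
    have := ih (acc ++ List.replicate (v - p).toNat last ++ [g v]) (g v) (v + 1)
    simp only at this ⊢
    rw [this, pvBOut]
    simp

theorem pvBOut_congr (n : Int) (vs : List Int) :
    ∀ (g g' : Int → List Int) (p : Int) (last : List Int),
    (∀ v ∈ vs, g v = g' v) →
    pvBOut g n vs p last = pvBOut g' n vs p last := by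
  induction vs with
  | nil => intro g g' p last _; rfl
  | cons v vs ih =>
    intro g g' p last hg
    rw [pvBOut, pvBOut, hg v (by simp),
      ih g g' (v + 1) (g' v) (fun w hw => hg w (by simp [hw]))]

-- ===== VERDICT (by name: the statement is the Claim_ definition above) =====
theorem expand_detection_spec : Claim_equal_expand_detection := by
  intro detections idx length _ hpre
  obtain ⟨hne, hlen⟩ := hpre
  unfold Spec_expand_detection expand_detection expand_detection_alt
  simp only []
  set last0 : List Int :=
    (match PySem.List.pyGet? detections 0 with
    | some (some d) => d
    | _ => []) with hlast0
  set ps := idx.zip detections with hps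
  set L := pvL ps with hL
  set anchors := pvBuild length PySem.Dict.empty ps with hanch
  -- A side: rewrite step function, then fold lemma
  have hstepfun : (fun (st : List Int × List (List Int)) i =>
      let last :=
        if idx.contains i then
          match PySem.List.index? idx i with
          | some j =>
            match PySem.List.pyGet? detections (j : Int) with
            | some (some d) => d
            | _ => []
          | none => st.1
        else st.1
      (last, st.2 ++ [last]))
      = (fun (st : List Int × List (List Int)) i => ((L i).getD st.1, st.2 ++ [(L i).getD st.1])) := by
    funext st i
    have := pvStep_eq detections idx hlen i st.1
    simp only [hL, hps]
    simp only [this]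
  rw [hstepfun, pvAOut_foldl L (PySem.List.pyRange 0 length 1) last0 []]
  simp only [List.nil_append]
  -- B side
  have hzip : (idx.zip detections).foldl
      (fun d p => if 0 ≤ p.1 ∧ p.1 < length ∧ d.contains p.1 = false
        then d.insert p.1 (p.2.getD []) else d) PySem.Dict.empty = anchors := rfl
  have hlast0' : ((PySem.List.pyGet? detections 0).getD none).getD [] = last0 := by
    rw [hlast0]
    cases h : PySem.List.pyGet? detections 0 with
    | none => rfl
    | some o => cases o <;> rfl
  rw [hzip, hlast0']
  set vs := PySem.List.sorted anchors.keys (fun x => x) false with hvs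
  rw [pvBOut_foldl (fun v => anchors.getD v []) length vs [] last0 0]
  simp only [List.nil_append]
  -- properties of vs
  have hkeys_nodup : anchors.keys.Nodup :=
    pvBuild_keys_nodup length ps PySem.Dict.empty (by simp)
  have hperm : vs.Perm anchors.keys := PySem.List.sorted_perm anchors.keys (fun x => x) false
  have hvs_nodup : vs.Nodup := hperm.nodup_iff.mpr hkeys_nodup
  have hvs_mem : ∀ v, v ∈ vs ↔ v ∈ anchors.keys := fun v => hperm.mem_iff
  have hvs_le : vs.Pairwise (fun a b => a ≤ b) := PySem.List.sorted_pairwise anchors.keys (fun x => x)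
  have hvs_lt : vs.Pairwise (· < ·) := by
    have := List.Pairwise.and hvs_le (List.nodup_iff_pairwise_ne.mp hvs_nodup)
    exact this.imp (fun h => lt_of_le_of_ne h.1 h.2)
  have hget : ∀ v, 0 ≤ v → v < length → anchors.get? v = L v := by
    intro v h0 hn
    rw [hanch, pvBuild_get? length ps PySem.Dict.empty v h0 hn, hL]
    simp [PySem.Dict.get?_empty]
  have hbnd : ∀ v ∈ vs, 0 ≤ v ∧ v < length := by
    intro v hv
    rcases pvBuild_keys_range length ps PySem.Dict.empty v ((hvs_mem v).mp hv) with h | h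
    · simp [PySem.Dict.keys_empty] at h
    · exact h
  have hiff : ∀ i, 0 ≤ i → i < length → ((L i).isSome ↔ i ∈ vs) := by
    intro i h0 hn
    rw [hvs_mem i, ← hget i h0 hn]
    constructor
    · intro h
      obtain ⟨x, hx⟩ := Option.isSome_iff_exists.mp h
      by_contra hmem
      rw [(PySem.Dict.get?_eq_none_iff_not_mem_keys anchors i).mpr hmem] at hx
      simp at hx
    · intro h
      by_contra hs
      rw [Option.not_isSome_iff_eq_none] at hs
      exact ((PySem.Dict.get?_eq_none_iff_not_mem_keys anchors i).mp hs) h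
  have hgcong : ∀ v ∈ vs, anchors.getD v [] = (L v).getD [] := by
    intro v hv
    rw [PySem.Dict.getD_eq_get?_getD, hget v (hbnd v hv).1 (hbnd v hv).2]
  rw [pvBOut_congr length vs _ (fun v => (L v).getD []) 0 last0 hgcong]
  exact (pvMain L length vs 0 last0 hbnd hvs_lt hiff).symm
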